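-- pv_equiv track=rewrite | github.com/where-is-paul/oreo | main/online/workfunction.py | wf_onestep
-- ===== SOURCE A (Python) =====
-- def wf_onestep(opt, costs, alpha):
--     new_opt = []
--     for j in range(len(costs)):
--         min_idx = opt.index(min(opt))
--         cost_self = opt[j] + costs[j]
--         new_opt.append(min(cost_self, opt[min_idx] + costs[j] + alpha))
--     min_idx = new_opt.index(min(new_opt))
--     return min_idx, new_opt
-- ===== SOURCE B (Python) =====
-- def wf_onestep(opt, costs, alpha):
--     shifted = min(opt) + alpha
--     rev_vals = []
--     best = None
--     best_idx = 0
--     for j in range(len(costs) - 1, -1, -1):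
--         o = opt[j]
--         v = costs[j] + (o if o < shifted else shifted)
--         rev_vals.append(v)
--         if best is None or v <= best:
--             best = v
--             best_idx = j
--     rev_vals.reverse()
--     return best_idx, rev_vals
-- ===== Notes on version B (the rewrite author's own statement) =====
-- stated objective: faster
-- what changed: B traverses costs back-to-front once, building the value list in reverse (reversed at the end) while keeping a running minimum with non-strict (<=) updates so the earliest index wins, replacing A's per-iteration min(opt)/opt.index scans and its trailing new_opt.index(min(new_opt)) scan.
import Mathlib
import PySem

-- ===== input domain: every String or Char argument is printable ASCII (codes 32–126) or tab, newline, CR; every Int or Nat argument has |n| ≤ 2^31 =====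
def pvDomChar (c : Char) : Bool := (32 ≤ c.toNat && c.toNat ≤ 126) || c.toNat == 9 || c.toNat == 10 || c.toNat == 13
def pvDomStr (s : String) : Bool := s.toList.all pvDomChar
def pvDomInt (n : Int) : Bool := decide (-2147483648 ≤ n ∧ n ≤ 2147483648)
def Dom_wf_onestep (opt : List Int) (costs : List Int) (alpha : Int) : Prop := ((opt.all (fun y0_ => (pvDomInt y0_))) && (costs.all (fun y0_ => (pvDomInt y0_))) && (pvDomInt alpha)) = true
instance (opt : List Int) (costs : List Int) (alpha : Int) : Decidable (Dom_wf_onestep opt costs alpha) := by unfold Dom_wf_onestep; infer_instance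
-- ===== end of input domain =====

-- B traverses costs back-to-front once, building the value list in reverse (reversed at the end)
-- while keeping a running minimum with non-strict (<=) updates so the earliest index wins,
-- replacing A's per-iteration min(opt)/opt.index scans and its trailing index(min(...)) scan.

-- ===== PORT A =====
def wf_onestep (opt : List Int) (costs : List Int) (alpha : Int) : Int × List Int :=
  let new_opt := (PySem.List.pyRange 0 (PySem.List.len costs) 1).foldl
    (fun acc j =>
      let m := (PySem.List.min? opt (fun y => y)).getD 0
      let min_idx := (PySem.List.index? opt m).getD 0
      let cost_self := PySem.List.pyGetD opt j 0 + PySem.List.pyGetD costs j 0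
      acc ++ [min cost_self (PySem.List.pyGetD opt ((min_idx : Nat) : Int) 0 + PySem.List.pyGetD costs j 0 + alpha)]) []
  let min_idx := (PySem.List.index? new_opt ((PySem.List.min? new_opt (fun y => y)).getD 0)).getD 0
  (((min_idx : Nat) : Int), new_opt)

-- ===== PORT B =====
-- one reverse-loop iteration of Source B: append v to the reversed value list, update (best, best_idx) on v ≤ best
def pvStepB (opt costs : List Int) (shifted : Int) (st : List Int × Option Int × Int) (j : Int) : List Int × Option Int × Int :=
  let o := PySem.List.pyGetD opt j 0
  let v := PySem.List.pyGetD costs j 0 + (if o < shifted then o else shifted)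
  (st.1 ++ [v],
    match st.2.1 with
    | none => (some v, j)
    | some b => if v ≤ b then (some v, j) else st.2)

def wf_onestep_alt (opt : List Int) (costs : List Int) (alpha : Int) : Int × List Int :=
  let shifted := (PySem.List.min? opt (fun y => y)).getD 0 + alpha
  let st := (PySem.List.pyRange (PySem.List.len costs - 1) (-1) (-1)).foldl
    (pvStepB opt costs shifted) ([], none, 0)
  (st.2.2, st.1.reverse)

-- ===== PRECONDITION & SPEC =====
-- Pre: Python A raises ValueError on empty costs (min of empty new_opt) or empty opt,
-- and IndexError when len(costs) > len(opt) (opt[j]); exactly those inputs are excluded.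
def Pre_wf_onestep (opt : List Int) (costs : List Int) (alpha : Int) : Prop :=
  costs ≠ [] ∧ costs.length ≤ opt.length
instance (opt : List Int) (costs : List Int) (alpha : Int) : Decidable (Pre_wf_onestep opt costs alpha) := by unfold Pre_wf_onestep; infer_instance

def pvWitness_wf_onestep : List Int × List Int × Int := ([2, 1], [3, 4], 1)

def Spec_wf_onestep (opt : List Int) (costs : List Int) (alpha : Int) (out : Int × List Int) : Prop := out = wf_onestep_alt opt costs alpha
instance (opt : List Int) (costs : List Int) (alpha : Int) (out : Int × List Int) : Decidable (Spec_wf_onestep opt costs alpha out) := by unfold Spec_wf_onestep; infer_instance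

-- ===== CLAIM (what is proved, stated in full; the proofs are below) =====
def Claim_equal_wf_onestep : Prop := ∀ (opt : List Int) (costs : List Int) (alpha : Int), Dom_wf_onestep opt costs alpha → Pre_wf_onestep opt costs alpha → Spec_wf_onestep opt costs alpha (wf_onestep opt costs alpha)

-- ===== LEMMAS AND PROOFS =====

-- the common value list: V[j] = costs[j] + min(opt[j], shifted)
def pvV (opt costs : List Int) (shifted : Int) : List Int :=
  (List.range costs.length).map
    (fun k => PySem.List.pyGetD costs ((k : Nat) : Int) 0 + min (PySem.List.pyGetD opt ((k : Nat) : Int) 0) shifted)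

theorem pvV_length (opt costs : List Int) (shifted : Int) :
    (pvV opt costs shifted).length = costs.length := by simp [pvV]

theorem pv_if_min (o s : Int) : (if o < s then o else s) = min o s := by
  rw [Int.min_def]; split_ifs <;> omega

theorem pv_foldl_min_min (T : List Int) : ∀ a c : Int, T.foldl min (min a c) = min a (T.foldl min c) := by
  induction T with
  | nil => intro a c; simp
  | cons x t ih => intro a c; simp only [List.foldl_cons]; rw [min_assoc, ih]

theorem pv_foldl_min_mem_of_le (T : List Int) (b y : Int) (hy : y ∈ T) (hyb : y ≤ b) :
    T.foldl min b ∈ T := by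
  rcases PySem.List.foldl_min_mem T b with h | h
  · have h1 : T.foldl min b ≤ y := (PySem.List.foldl_min_le T b).2 y hy
    have h2 : y = b := le_antisymm hyb (h ▸ h1)
    rw [h, ← h2]; exact hy
  · exact h

theorem pv_foldl_min_eq_self (T : List Int) (b : Int) (hT : ∀ y ∈ T, b < y) :
    T.foldl min b = b := by
  rcases PySem.List.foldl_min_mem T b with h | h
  · exact h
  · exact absurd ((PySem.List.foldl_min_le T b).1) (not_le.mpr (hT _ h))

theorem pv_idxOf_append_of_mem (T T' : List Int) (m : Int) (h : m ∈ T) :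
    List.idxOf m (T ++ T') = List.idxOf m T := by
  induction T with
  | nil => simp at h
  | cons x t ih =>
    by_cases hx : x = m
    · subst hx; simp
    · rcases List.mem_cons.mp h with h' | h'
      · exact absurd h'.symm hx
      · simp [hx, ih h']

theorem pv_idxOf?_of_mem (V : List Int) (m : Int) (h : m ∈ V) :
    List.idxOf? m V = some (List.idxOf m V) := by
  induction V with
  | nil => simp at h
  | cons v t ih =>
    by_cases hv : v = m
    · subst hv; simp [List.idxOf?_cons]
    · rcases List.mem_cons.mp h with h | h
      · exact absurd h.symm hv
      · simp [List.idxOf?_cons, hv, ih h]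

theorem pv_idxOf_append_self (T : List Int) (v : Int) (h : v ∉ T) :
    List.idxOf v (T ++ [v]) = T.length := by
  have h1 := PySem.List.index?_append_singleton_self T v h
  rw [PySem.List.index?_eq_idxOf?] at h1
  have h2 := pv_idxOf?_of_mem (T ++ [v]) v (by simp)
  rw [h1] at h2
  exact ((Option.some.injEq _ _).mp h2).symm

theorem pvFoldB_some (opt costs : List Int) (shifted : Int) :
    ∀ (k : Nat), k ≤ costs.length → ∀ (acc : List Int) (b i : Int),
    List.foldl (pvStepB opt costs shifted) (acc, some b, i)
      (PySem.List.pyRange ((k : Int) - 1) (-1) (-1))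
    = (acc ++ ((pvV opt costs shifted).take k).reverse,
       some (((pvV opt costs shifted).take k).foldl min b),
       if ((pvV opt costs shifted).take k).any (fun y => decide (y ≤ b))
         then ((List.idxOf (((pvV opt costs shifted).take k).foldl min b)
                 ((pvV opt costs shifted).take k) : Nat) : Int)
         else i) := by
  intro k
  induction k with
  | zero =>
    intro _ acc b i
    rw [show ((0 : Nat) : Int) - 1 = -1 by norm_num,
        PySem.List.pyRange_neg_one_eq_nil (by norm_num)]
    simp
  | succ k ih =>
    intro hk acc b i
    have hkn : k < costs.length := by omega
    have hkV : k < (pvV opt costs shifted).length := by rw [pvV_length]; exact hkn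
    have hgot : (pvV opt costs shifted)[k]'hkV
        = PySem.List.pyGetD costs ((k : Nat) : Int) 0
          + min (PySem.List.pyGetD opt ((k : Nat) : Int) 0) shifted := by
      simp [pvV]
    set V := pvV opt costs shifted with hV
    set v := V[k]'hkV with hvk
    have htake : V.take (k + 1) = V.take k ++ [v] := by
      rw [List.take_add_one, List.getElem?_eq_getElem hkV]; rfl
    set T := V.take k with hT
    have hstep : pvStepB opt costs shifted (acc, some b, i) ((k : Nat) : Int)
        = (acc ++ [v], if v ≤ b then (some v, ((k : Nat) : Int)) else (some b, i)) := by
      unfold pvStepB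
      dsimp only
      rw [pv_if_min, ← hgot]
    rw [show ((k + 1 : Nat) : Int) - 1 = (k : Int) by push_cast; ring,
        PySem.List.pyRange_neg_one_cons (by omega),
        List.foldl_cons, hstep, htake]
    by_cases hvb : v ≤ b
    · rw [if_pos hvb, ih (by omega) (acc ++ [v]) v ((k : Nat) : Int)]
      have hbest : (T ++ [v]).foldl min b = T.foldl min v := by
        rw [List.foldl_append, List.foldl_cons, List.foldl_nil]
        have h1 : T.foldl min v = T.foldl min (min v b) := by rw [min_eq_left hvb]
        rw [h1, pv_foldl_min_min, min_comm]
      have hany : (T ++ [v]).any (fun y => decide (y ≤ b)) = true := by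
        simp [hvb]
      rw [hbest, hany, if_pos rfl]
      simp only [List.reverse_append, List.reverse_cons, List.reverse_nil, List.nil_append,
        List.append_assoc, List.singleton_append, Prod.mk.injEq, true_and]
      by_cases hTany : T.any (fun y => decide (y ≤ v)) = true
      · rw [if_pos hTany]
        obtain ⟨y, hyT, hyv⟩ := List.any_eq_true.mp hTany
        have hmem : T.foldl min v ∈ T := pv_foldl_min_mem_of_le T v y hyT (by simpa using hyv)
        rw [pv_idxOf_append_of_mem T [v] _ hmem]
      · rw [if_neg hTany]
        have hall : ∀ y ∈ T, v < y := by
          intro y hy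
          by_contra hc
          exact hTany (List.any_eq_true.mpr ⟨y, hy, by simpa using not_lt.mp hc⟩)
        have heq : T.foldl min v = v := pv_foldl_min_eq_self T v hall
        have hnm : v ∉ T := fun hm => lt_irrefl v (hall v hm)
        rw [heq, pv_idxOf_append_self T v hnm]
        have hlenT : T.length = k := by rw [hT, List.length_take]; omega
        rw [hlenT]
    · rw [if_neg hvb, ih (by omega) (acc ++ [v]) b i]
      have hle : T.foldl min b ≤ b := (PySem.List.foldl_min_le T b).1
      have hvb' : b < v := not_le.mp hvb
      have hbest : (T ++ [v]).foldl min b = T.foldl min b := by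
        rw [List.foldl_append, List.foldl_cons, List.foldl_nil]
        exact min_eq_left (le_of_lt (lt_of_le_of_lt hle hvb'))
      have hany : (T ++ [v]).any (fun y => decide (y ≤ b)) = T.any (fun y => decide (y ≤ b)) := by
        simp [decide_eq_false (not_le.mpr hvb')]
      rw [hbest, hany]
      simp only [List.reverse_append, List.reverse_cons, List.reverse_nil, List.nil_append,
        List.append_assoc, List.singleton_append, Prod.mk.injEq, true_and]
      by_cases hTany : T.any (fun y => decide (y ≤ b)) = true
      · rw [if_pos hTany, if_pos hTany]
        obtain ⟨y, hyT, hyb⟩ := List.any_eq_true.mp hTany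
        have hmem : T.foldl min b ∈ T := pv_foldl_min_mem_of_le T b y hyT (by simpa using hyb)
        rw [pv_idxOf_append_of_mem T [v] _ hmem]
      · rw [if_neg hTany, if_neg hTany]

-- A's loop builds the same value list (needs opt nonempty so that min(opt)/opt.index agree)
theorem pvAList (opt costs : List Int) (alpha : Int) (h : opt ≠ []) :
    (PySem.List.pyRange 0 (PySem.List.len costs) 1).foldl
      (fun acc j =>
        let m := (PySem.List.min? opt (fun y => y)).getD 0
        let min_idx := (PySem.List.index? opt m).getD 0
        let cost_self := PySem.List.pyGetD opt j 0 + PySem.List.pyGetD costs j 0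
        acc ++ [min cost_self (PySem.List.pyGetD opt ((min_idx : Nat) : Int) 0 + PySem.List.pyGetD costs j 0 + alpha)]) []
    = pvV opt costs ((PySem.List.min? opt (fun y => y)).getD 0 + alpha) := by
  unfold pvV
  dsimp only
  rw [PySem.List.foldl_append_singleton_eq_map
    (f := fun j => min (PySem.List.pyGetD opt j 0 + PySem.List.pyGetD costs j 0)
      (PySem.List.pyGetD opt ((((PySem.List.index? opt ((PySem.List.min? opt (fun y => y)).getD 0)).getD 0 : Nat) : Int)) 0
        + PySem.List.pyGetD costs j 0 + alpha))]
  rw [List.nil_append]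
  have hlen : PySem.List.len costs = (costs.length : Int) := by simp [PySem.List.len_eq]
  rw [hlen, PySem.List.pyRange_one, List.map_map]
  have hn : ((costs.length : Int) - 0).toNat = costs.length := by omega
  rw [hn]
  apply List.map_congr_left
  intro k hk
  obtain ⟨m0, hmin⟩ : ∃ m0, PySem.List.min? opt (fun y => y) = some m0 := by
    cases hc : PySem.List.min? opt (fun y => y) with
    | none => exact absurd ((PySem.List.min?_eq_none_iff opt _).mp hc) h
    | some m0 => exact ⟨m0, rfl⟩
  have hmem : m0 ∈ opt := PySem.List.min?_mem hmin
  obtain ⟨kk, hidx⟩ : ∃ kk, PySem.List.index? opt m0 = some kk :=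
    Option.isSome_iff_exists.mp ((PySem.List.index?_isSome_iff opt m0).mpr hmem)
  obtain ⟨hkk, hget, -⟩ := PySem.List.getElem_of_index?_eq_some hidx
  have hfetch : PySem.List.pyGetD opt ((kk : Nat) : Int) 0 = m0 := by
    rw [PySem.List.pyGetD_natCast, List.getD_eq_getElem _ _ hkk, hget]
  simp only [Function.comp, hmin, Option.getD_some, hidx]
  rw [hfetch]
  simp only [zero_add]
  omega

-- ===== VERDICT (by name: the statement is the Claim_ definition above) =====
theorem wf_onestep_spec : Claim_equal_wf_onestep := by
  unfold Claim_equal_wf_onestep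
  intro opt costs alpha _ hpre
  unfold Spec_wf_onestep
  obtain ⟨hc, hlen⟩ := hpre
  have hn1 : 1 ≤ costs.length := List.length_pos_iff.mpr hc
  have hopt : opt ≠ [] := by
    intro h0
    rw [h0] at hlen
    simp only [List.length_nil, Nat.le_zero] at hlen
    omega
  unfold wf_onestep wf_onestep_alt
  dsimp only
  rw [pvAList opt costs alpha hopt]
  set shifted := (PySem.List.min? opt (fun y => y)).getD 0 + alpha with hsh
  set V := pvV opt costs shifted with hV
  set n := costs.length with hn
  have hVlen : V.length = n := pvV_length opt costs shifted
  have hkV : n - 1 < V.length := by omega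
  have hgot : V[n - 1]'hkV
      = PySem.List.pyGetD costs ((n - 1 : Nat) : Int) 0
        + min (PySem.List.pyGetD opt ((n - 1 : Nat) : Int) 0) shifted := by
    simp [hV, pvV]
  set v := V[n - 1]'hkV with hvk
  have hlenc : PySem.List.len costs = (n : Int) := by simp [hn]
  rw [hlenc, show (n : Int) - 1 = ((n - 1 : Nat) : Int) by omega,
      PySem.List.pyRange_neg_one_cons (by omega), List.foldl_cons]
  have hstep : pvStepB opt costs shifted ([], none, 0) ((n - 1 : Nat) : Int)
      = ([v], some v, ((n - 1 : Nat) : Int)) := by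
    unfold pvStepB
    dsimp only
    rw [pv_if_min, ← hgot]
    rfl
  rw [hstep, pvFoldB_some opt costs shifted (n - 1) (by omega) [v] v ((n - 1 : Nat) : Int)]
  set T := V.take (n - 1) with hT
  have hTlen : T.length = n - 1 := by rw [hT, List.length_take]; omega
  have htake : T ++ [v] = V := by
    have h1 : V.take (n - 1 + 1) = V.take (n - 1) ++ [v] := by
      rw [List.take_add_one, List.getElem?_eq_getElem hkV]; rfl
    have h2 : n - 1 + 1 = n := by omega
    rw [h2] at h1
    rw [hT, ← h1, ← hVlen, List.take_length]
  have hlist : ([v] ++ T.reverse).reverse = V := by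
    rw [List.reverse_append, List.reverse_reverse, List.reverse_cons, List.reverse_nil,
        List.nil_append, htake]
  have hVne : V ≠ [] := by
    intro h0
    rw [h0] at hVlen
    simp only [List.length_nil] at hVlen
    omega
  obtain ⟨M, hmin⟩ : ∃ M, PySem.List.min? V (fun y => y) = some M := by
    cases hm : PySem.List.min? V (fun y => y) with
    | none => exact absurd ((PySem.List.min?_eq_none_iff V _).mp hm) hVne
    | some M => exact ⟨M, rfl⟩
  have hMmem : M ∈ V := PySem.List.min?_mem hmin
  have hMmin : ∀ y ∈ V, M ≤ y := PySem.List.min?_isMin hmin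
  have hidxA : PySem.List.index? V M = some (List.idxOf M V) := by
    rw [PySem.List.index?_eq_idxOf?]
    exact pv_idxOf?_of_mem V M hMmem
  rw [hmin]
  simp only [Option.getD_some, hidxA]
  refine Prod.ext ?_ (by simpa using hlist.symm)
  simp only
  by_cases hTany : T.any (fun y => decide (y ≤ v)) = true
  · rw [if_pos hTany]
    obtain ⟨y, hyT, hyv⟩ := List.any_eq_true.mp hTany
    have hMv : T.foldl min v ∈ T := pv_foldl_min_mem_of_le T v y hyT (by simpa using hyv)
    have hMvV : T.foldl min v ∈ V := by
      rw [← htake]; exact List.mem_append_left _ hMv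
    have hMeq : M = T.foldl min v := by
      apply le_antisymm (hMmin _ hMvV)
      rw [← htake] at hMmem
      rcases List.mem_append.mp hMmem with hm | hm
      · exact (PySem.List.foldl_min_le T v).2 M hm
      · have hMv' : M = v := by simpa using hm
        rw [hMv']
        exact (PySem.List.foldl_min_le T v).1
    rw [hMeq, ← htake, pv_idxOf_append_of_mem T [v] _ hMv]
  · rw [if_neg hTany]
    have hall : ∀ y ∈ T, v < y := by
      intro y hy
      by_contra hcon
      exact hTany (List.any_eq_true.mpr ⟨y, hy, by simpa using not_lt.mp hcon⟩)
    have hvV : v ∈ V := by rw [← htake]; exact List.mem_append_right _ (by simp)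
    have hMeq : M = v := by
      rw [← htake] at hMmem
      rcases List.mem_append.mp hMmem with hm | hm
      · exact absurd (hMmin v hvV) (not_le.mpr (hall M hm))
      · simpa using hm
    have hnm : v ∉ T := fun hm => lt_irrefl v (hall v hm)
    rw [hMeq, ← htake, pv_idxOf_append_self T v hnm, hTlen]
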